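-- pv_equiv track=rewrite | github.com/shaileshpandit141/python-exercises-2023 | 1.Basic/1.BasicPart1/prob_114.py | p_number_inlist
-- ===== SOURCE A (Python) =====
-- def p_number_inlist(mylist):
--     temp_list = []
--     for i in mylist:
--         if i >= 0:
--             temp_list.append(i)
--         else:
--             pass
--     else:
--         return sorted(temp_list)
-- ===== SOURCE B (Python) =====
-- import bisect
--
-- def p_number_inlist(mylist):
--     s = sorted(mylist)
--     i = bisect.bisect_left(s, 0)
--     return s[i:]
-- ===== Notes on version B (the rewrite author's own statement) =====
-- stated objective: alternative
-- what changed: B sorts the whole input once and takes the suffix starting at bisect_left(s, 0), replacing A's per-element filter loop with a binary-search boundary on the sorted list.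
import Mathlib
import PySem

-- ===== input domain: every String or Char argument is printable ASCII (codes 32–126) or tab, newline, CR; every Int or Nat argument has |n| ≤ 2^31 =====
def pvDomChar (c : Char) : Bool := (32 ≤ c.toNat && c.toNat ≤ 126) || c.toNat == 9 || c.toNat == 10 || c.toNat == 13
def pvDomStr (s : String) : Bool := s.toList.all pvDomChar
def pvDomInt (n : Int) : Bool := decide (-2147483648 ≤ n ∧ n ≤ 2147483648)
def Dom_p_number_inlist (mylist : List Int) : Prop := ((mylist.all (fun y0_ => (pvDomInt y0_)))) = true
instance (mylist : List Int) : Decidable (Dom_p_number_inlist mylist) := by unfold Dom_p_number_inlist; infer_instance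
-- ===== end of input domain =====

-- B sorts the whole input once and returns the suffix from bisect_left(s, 0); same result as A's filter-then-sort, an alternative decomposition (not claimed faster).


-- ===== PORT A =====
-- temp_list accumulator loop, then sorted(temp_list)
def p_number_inlist (mylist : List Int) : List Int :=
  let temp_list : List Int :=
    mylist.foldl (fun acc i => if i ≥ 0 then acc ++ [i] else acc) []
  PySem.List.sorted temp_list (fun x => x) false

-- ===== PORT B =====
-- bisect.bisect_left (CPython's binary-search loop), ported step for step
def bisectLeftGo (s : List Int) (x : Int) (lo hi : Nat) : Nat :=
  if _h : lo < hi then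
    let mid := (lo + hi) / 2
    if s.getD mid 0 < x then bisectLeftGo s x (mid + 1) hi
    else bisectLeftGo s x lo mid
  else lo
termination_by hi - lo
decreasing_by all_goals omega

def bisectLeft (s : List Int) (x : Int) : Nat := bisectLeftGo s x 0 s.length

def p_number_inlist_alt (mylist : List Int) : List Int :=
  let s := PySem.List.sorted mylist (fun x => x) false
  let i := bisectLeft s 0
  PySem.List.slice s (some (i : Int)) none

-- ===== PRECONDITION & SPEC =====
def Spec_p_number_inlist (mylist : List Int) (out : List Int) : Prop := out = p_number_inlist_alt mylist
instance (mylist : List Int) (out : List Int) : Decidable (Spec_p_number_inlist mylist out) := by unfold Spec_p_number_inlist; infer_instance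

-- ===== CLAIM (what is proved, stated in full; the proofs are below) =====
def Claim_equal_p_number_inlist : Prop := ∀ (mylist : List Int), Dom_p_number_inlist mylist → Spec_p_number_inlist mylist (p_number_inlist mylist)

-- ===== LEMMAS AND PROOFS =====

-- On a list whose first k elements are < x and whose elements from k on are ≥ x,
-- the binary search returns k (for any bracketing lo ≤ k ≤ hi ≤ length).
theorem bisectLeftGo_eq (s : List Int) (x : Int) (k : Nat)
    (hlt : ∀ i (h : i < s.length), i < k → s[i] < x)
    (hge : ∀ i (h : i < s.length), k ≤ i → x ≤ s[i]) :
    ∀ lo hi, lo ≤ k → k ≤ hi → hi ≤ s.length → bisectLeftGo s x lo hi = k := by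
  intro lo hi
  induction hmeas : hi - lo using Nat.strong_induction_on generalizing lo hi with
  | _ n ih =>
    intro hlok hkhi hhis
    unfold bisectLeftGo
    by_cases h : lo < hi
    · simp only [h, dif_pos]
      set mid := (lo + hi) / 2 with hmid
      have hmlt : mid < s.length := by omega
      have hgd : s.getD mid 0 = s[mid] := List.getD_eq_getElem s 0 hmlt
      by_cases hc : s.getD mid 0 < x
      · have hmk : mid < k := by
          by_contra hnk
          exact absurd (hge mid hmlt (by omega)) (by rw [hgd] at hc; omega)
        simp only [hc, if_pos]
        exact ih (hi - (mid + 1)) (by omega) (mid + 1) hi rfl (by omega) hkhi hhis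
      · have hkm : k ≤ mid := by
          by_contra hnk
          exact absurd (hlt mid hmlt (by omega)) (by rw [hgd] at hc; omega)
        simp only [hc, if_neg, not_false_iff]
        exact ih (mid - lo) (by omega) lo mid rfl hlok hkm (by omega)
    · simp only [h, dif_neg, not_false_iff]
      omega

theorem sorted_takeWhile_bounds (mylist : List Int) :
    let s := PySem.List.sorted mylist (fun x => x) false
    let k := (s.takeWhile (fun y => decide (y < 0))).length
    (∀ i (h : i < s.length), i < k → s[i] < 0) ∧
    (∀ i (h : i < s.length), k ≤ i → (0:Int) ≤ s[i]) := by
  intro s k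
  have hpre : (s.takeWhile (fun y => decide (y < 0))) <+: s := List.takeWhile_prefix _
  constructor
  · intro i hi hik
    have hget : (s.takeWhile (fun y => decide (y < 0)))[i]'(hik) = s[i] :=
      List.IsPrefix.getElem hpre hik
    have hmem : s[i] ∈ s.takeWhile (fun y => decide (y < 0)) := by
      rw [← hget]; exact List.getElem_mem _
    have := List.mem_takeWhile_imp hmem
    simpa using this
  · intro i hi hki
    -- s[k] ≥ 0 (head of dropWhile), then monotonicity
    have hklen : k < s.length := by omega
    have hk0 : (0:Int) ≤ s[k] := by
      have hdrop : s.drop k = s.dropWhile (fun y => decide (y < 0)) := by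
        conv_lhs => rw [← List.takeWhile_append_dropWhile (p := fun y => decide (y < 0)) (l := s)]
        exact List.drop_left' rfl
      have hne : s.dropWhile (fun y => decide (y < 0)) ≠ [] := by
        rw [← hdrop]
        simp [List.drop_eq_nil_iff]
        omega
      have hhead := List.head_dropWhile_not (p := fun y => decide (y < 0)) hne
      have hhq : (s.dropWhile (fun y => decide (y < 0))).head? = some s[k] := by
        rw [← hdrop, List.head?_drop, List.getElem?_eq_getElem hklen]
      rw [List.head?_eq_some_head hne] at hhq
      have : (s.dropWhile (fun y => decide (y < 0))).head hne = s[k] := Option.some.inj hhq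
      rw [this] at hhead
      simpa using hhead
    calc (0:Int) ≤ s[k] := hk0
      _ ≤ s[i] := PySem.List.sorted_id_getElem_mono mylist hki hi

theorem p_number_inlist_spec' (mylist : List Int) :
    p_number_inlist mylist = p_number_inlist_alt mylist := by
  unfold p_number_inlist p_number_inlist_alt
  rw [PySem.List.foldl_append_ite_eq_filter, List.nil_append]
  set s := PySem.List.sorted mylist (fun x => x) false with hs
  set k := (s.takeWhile (fun y => decide (y < 0))).length with hk
  obtain ⟨hlt, hge⟩ := sorted_takeWhile_bounds mylist
  rw [← hs] at hlt hge
  rw [← hk] at hlt hge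
  show PySem.List.sorted (List.filter (fun x => decide (x ≥ 0)) mylist) (fun x => x) false
      = PySem.List.slice s (some ((bisectLeft s 0 : Nat) : Int)) none
  -- B's index is k, and the slice is drop k = dropWhile (<0) s
  have hbis : bisectLeft s 0 = k := by
    have hkle : k ≤ s.length := by
      exact (List.takeWhile_prefix _).length_le
    exact bisectLeftGo_eq s 0 k hlt hge 0 s.length (Nat.zero_le _) hkle le_rfl
  rw [hbis, PySem.List.slice_from_natCast]
  have hdrop : s.drop k = s.dropWhile (fun y => decide (y < 0)) := by
    conv_lhs => rw [← List.takeWhile_append_dropWhile (p := fun y => decide (y < 0)) (l := s)]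
    exact List.drop_left' rfl
  rw [hdrop]
  -- A's side: sorted (filter (0 ≤ ·) mylist) equals that dropWhile
  apply PySem.List.sorted_id_eq_of_perm_of_pairwise
  · -- dropWhile (<0) s  ~  filter (0 ≤ ·) mylist
    have hfil : s.dropWhile (fun y => decide (y < 0)) = s.filter (fun i => decide (i ≥ 0)) := by
      conv_rhs => rw [← List.takeWhile_append_dropWhile (p := fun y => decide (y < 0)) (l := s)]
      rw [List.filter_append]
      have h1 : (s.takeWhile (fun y => decide (y < 0))).filter (fun i => decide (i ≥ 0)) = [] := by
        rw [List.filter_eq_nil_iff]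
        intro a ha
        have := List.mem_takeWhile_imp ha
        simp at this ⊢
        omega
      have h2 : (s.dropWhile (fun y => decide (y < 0))).filter (fun i => decide (i ≥ 0))
          = s.dropWhile (fun y => decide (y < 0)) := by
        rw [List.filter_eq_self]
        intro a ha
        rw [← hdrop] at ha
        obtain ⟨i, hi, rfl⟩ := List.getElem_of_mem ha
        have hkle : k ≤ s.length := (List.takeWhile_prefix _).length_le
        rw [List.length_drop] at hi
        rw [List.getElem_drop]
        have : (0:Int) ≤ s[k + i] := hge (k + i) (by omega) (by omega)
        simpa using this
      rw [h1, h2, List.nil_append]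
    rw [hfil]
    exact (List.Perm.filter _ (PySem.List.sorted_perm mylist (fun x => x) false))
  · -- sortedness of the suffix
    exact List.Pairwise.sublist (List.dropWhile_sublist _)
      (PySem.List.sorted_pairwise mylist (fun x => x))

-- ===== VERDICT (by name: the statement is the Claim_ definition above) =====
theorem p_number_inlist_spec : Claim_equal_p_number_inlist := by
  intro mylist _
  exact p_number_inlist_spec' mylist
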